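-- pv_equiv track=rewrite | github.com/aryannewyork/Basic-Text-Editor | 2020UCS0077.py | all_small
-- ===== SOURCE A (Python) =====
-- def all_small(para_):
--     new_para = ''
--     line_split = para_.split('\n')
--     for i in range(len(line_split)):
--         for j in line_split[i]:
--             if 65 <= ord(j) <= 90:
--                 new_para += chr(ord(j)+32)
--             else:
--                 new_para += j
--         if i != len(line_split) - 1:
--             new_para += '\n'
--     return new_para
-- ===== SOURCE B (Python) =====
-- def all_small(para_):
--     table = {i: i + 32 for i in range(65, 91)}
--     return para_.translate(table)
-- ===== Notes on version B (the rewrite author's own statement) =====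
-- stated objective: faster
-- what changed: Replaces the split-on-newline / per-character ord-comparison / string-concatenation loop with a precomputed uppercase-to-lowercase translation table (dict over codepoints 65-90) applied in one str.translate pass over the raw string.
import Mathlib
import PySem

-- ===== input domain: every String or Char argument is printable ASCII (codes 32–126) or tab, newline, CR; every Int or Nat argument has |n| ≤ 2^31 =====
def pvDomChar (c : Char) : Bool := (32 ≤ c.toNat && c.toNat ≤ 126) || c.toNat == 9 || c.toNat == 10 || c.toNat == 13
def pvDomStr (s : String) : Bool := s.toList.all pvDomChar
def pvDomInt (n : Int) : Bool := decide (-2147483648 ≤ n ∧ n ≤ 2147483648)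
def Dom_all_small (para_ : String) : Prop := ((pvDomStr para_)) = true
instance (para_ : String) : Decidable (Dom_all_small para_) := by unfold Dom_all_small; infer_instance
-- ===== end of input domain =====

-- B replaces A's split-on-newline / per-character branch / rejoin loop with a
-- precomputed codepoint translation table applied in one pass (idiomatic str.translate).

-- ===== PORT A =====
def all_small (para_ : String) : String :=
  let lineSplit := PySem.Chars.splitOn para_.toList ['\n']
  let newPara := (List.range lineSplit.length).foldl
    (fun acc i =>
      let acc := (lineSplit.getD i []).foldl
        (fun a j =>
          if 65 ≤ j.toNat ∧ j.toNat ≤ 90 then a ++ [Char.ofNat (j.toNat + 32)]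
          else a ++ [j]) acc
      if i ≠ lineSplit.length - 1 then acc ++ ['\n'] else acc) []
  String.ofList newPara

-- ===== PORT B =====
-- table = {i: i + 32 for i in range(65, 91)}
def pvTable : PySem.Dict Int Int :=
  (PySem.List.pyRange 65 91 1).foldl (fun d i => d.insert i (i + 32)) PySem.Dict.empty

-- para_.translate(table): each codepoint mapped through the table, unmapped ones kept
def all_small_alt (para_ : String) : String :=
  String.ofList (para_.toList.map (fun c =>
    match pvTable.get? (c.toNat : Int) with
    | some v => Char.ofNat v.toNat
    | none => c))

-- ===== PRECONDITION & SPEC =====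
def Spec_all_small (para_ : String) (out : String) : Prop := out = all_small_alt para_
instance (para_ : String) (out : String) : Decidable (Spec_all_small para_ out) := by unfold Spec_all_small; infer_instance

-- ===== CLAIM (what is proved, stated in full; the proofs are below) =====
def Claim_equal_all_small : Prop := ∀ (para_ : String), Dom_all_small para_ → Spec_all_small para_ (all_small para_)

-- ===== LEMMAS AND PROOFS =====

-- A's per-character transform
def fA (c : Char) : Char :=
  if 65 ≤ c.toNat ∧ c.toNat ≤ 90 then Char.ofNat (c.toNat + 32) else c

-- structural characterisation of str.split('\n')
def mySplit : List Char → List (List Char)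
  | [] => [[]]
  | x :: xs => if x = '\n' then [] :: mySplit xs else (mySplit xs).modifyHead (x :: ·)

lemma mySplit_ne_nil (s : List Char) : mySplit s ≠ [] := by
  cases s with
  | nil => simp [mySplit]
  | cons x xs =>
    simp only [mySplit]
    split
    · simp
    · cases h : mySplit xs with
      | nil => exact absurd h (mySplit_ne_nil xs)
      | cons a t => simp [List.modifyHead]

lemma splitOn_go_eq (fuel : Nat) (l cur : List Char) (accs : List (List Char))
    (h : l.length < fuel) :
    PySem.Chars.splitOn.go ['\n'] fuel l cur accs =
      accs.reverse ++ (mySplit l).modifyHead (cur.reverse ++ ·) := by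
  induction fuel generalizing l cur accs with
  | zero => omega
  | succ n ih =>
    cases l with
    | nil => simp [PySem.Chars.splitOn.go, mySplit]
    | cons x rest =>
      by_cases hx : x = '\n'
      · subst hx
        have : PySem.Chars.splitOn.go ['\n'] (n+1) ('\n' :: rest) cur accs =
            PySem.Chars.splitOn.go ['\n'] n rest [] (cur.reverse :: accs) := by
          simp [PySem.Chars.splitOn.go, List.isPrefixOf]
        rw [this, ih rest [] (cur.reverse :: accs) (by simpa using Nat.lt_of_succ_lt_succ h)]
        simp only [mySplit, List.modifyHead, List.reverse_cons, List.append_assoc]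
        simp only [List.reverse_nil, List.nil_append]
        cases mySplit rest <;> simp
      · have : PySem.Chars.splitOn.go ['\n'] (n+1) (x :: rest) cur accs =
            PySem.Chars.splitOn.go ['\n'] n rest (x :: cur) accs := by
          simp only [PySem.Chars.splitOn.go, List.isPrefixOf]
          split
          · next hp =>
              have h2 : '\n' = x := by simpa using hp
              exact absurd h2.symm hx
          · rfl
        rw [this, ih rest (x :: cur) accs (by simpa using Nat.lt_of_succ_lt_succ h)]
        simp only [mySplit, if_neg hx]
        cases hm : mySplit rest with
        | nil => exact absurd hm (mySplit_ne_nil rest)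
        | cons a t => simp [List.modifyHead]

lemma splitOn_eq (s : List Char) : PySem.Chars.splitOn s ['\n'] = mySplit s := by
  have := splitOn_go_eq (s.length + 1) s [] [] (Nat.lt_succ_self s.length)
  simp only [PySem.Chars.splitOn] at *
  rw [this]
  cases hm : mySplit s with
  | nil => exact absurd hm (mySplit_ne_nil s)
  | cons a t => simp [List.modifyHead]

-- the inner per-character loop of A
lemma inner_fold (line a : List Char) :
    line.foldl (fun a j =>
      if 65 ≤ j.toNat ∧ j.toNat ≤ 90 then a ++ [Char.ofNat (j.toNat + 32)]
      else a ++ [j]) a = a ++ line.map fA := by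
  induction line generalizing a with
  | nil => simp
  | cons x xs ih =>
    simp only [List.foldl_cons, List.map_cons, ih, fA]
    split <;> simp

-- join of mapped lines with '\n' separators
def joinLines : List (List Char) → List Char
  | [] => []
  | [l] => l.map fA
  | l :: l' :: ls => l.map fA ++ '\n' :: joinLines (l' :: ls)

lemma joinLines_cons_head (x : Char) (h : List Char) (t : List (List Char)) :
    joinLines ((x :: h) :: t) = fA x :: joinLines (h :: t) := by
  cases t <;> simp [joinLines]

lemma joinLines_eq (ls : List (List Char)) (h : ls ≠ []) :
    joinLines ls =
      (ls.dropLast.map (fun l => l.map fA ++ ['\n'])).flatten ++ (ls.getLast h).map fA := by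
  induction ls with
  | nil => exact absurd rfl h
  | cons l t ih =>
    cases t with
    | nil => simp [joinLines]
    | cons l' t' =>
      simp only [joinLines, List.dropLast_cons₂, List.map_cons, List.flatten_cons,
        List.getLast_cons (by simp : l' :: t' ≠ [])]
      rw [ih (by simp)]
      simp

-- A's outer loop over range, up to index m (all with trailing '\n')
lemma outer_fold_take (ls : List (List Char)) (m : Nat) (acc : List Char)
    (hm : m ≤ ls.length - 1) (hne : ls ≠ []) :
    (List.range m).foldl
      (fun acc i =>
        let acc := (ls.getD i []).foldl
          (fun a j =>
            if 65 ≤ j.toNat ∧ j.toNat ≤ 90 then a ++ [Char.ofNat (j.toNat + 32)]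
            else a ++ [j]) acc
        if i ≠ ls.length - 1 then acc ++ ['\n'] else acc) acc =
      acc ++ ((ls.take m).map (fun l => l.map fA ++ ['\n'])).flatten := by
  induction m generalizing acc with
  | zero => simp
  | succ n ih =>
    have hlen : 0 < ls.length := List.length_pos_iff.mpr hne
    have hn : n < ls.length - 1 := by omega
    rw [List.range_succ, List.foldl_append, ih acc (by omega)]
    simp only [List.foldl_cons, List.foldl_nil, inner_fold]
    rw [if_pos (by omega : n ≠ ls.length - 1)]
    have hnn : n < ls.length := by omega
    have hget : ls.getD n [] = ls[n] := by
      rw [List.getD_eq_getElem?_getD, List.getElem?_eq_getElem hnn]; rfl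
    rw [hget]
    have hmn : n < (List.map (fun l => List.map fA l ++ ['\n']) ls).length := by simpa using hnn
    have hstep : List.take (n + 1) (List.map (fun l => List.map fA l ++ ['\n']) ls) =
        List.take n (List.map (fun l => List.map fA l ++ ['\n']) ls) ++ [List.map fA ls[n] ++ ['\n']] := by
      rw [← List.take_concat_get hmn, List.concat_eq_append]
      simp
    simp [hstep, List.append_assoc]

lemma outer_fold (ls : List (List Char)) (hne : ls ≠ []) :
    (List.range ls.length).foldl
      (fun acc i =>
        let acc := (ls.getD i []).foldl
          (fun a j =>
            if 65 ≤ j.toNat ∧ j.toNat ≤ 90 then a ++ [Char.ofNat (j.toNat + 32)]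
            else a ++ [j]) acc
        if i ≠ ls.length - 1 then acc ++ ['\n'] else acc) [] = joinLines ls := by
  have hlen : 0 < ls.length := List.length_pos_iff.mpr hne
  have h1 : List.range ls.length = List.range (ls.length - 1) ++ [ls.length - 1] := by
    rw [← List.range_succ]
    congr 1
    omega
  rw [h1, List.foldl_append,
    outer_fold_take ls (ls.length - 1) [] (le_refl _) hne]
  simp only [List.foldl_cons, List.foldl_nil, inner_fold]
  rw [if_neg (by simp)]
  rw [joinLines_eq ls hne]
  have hd : ls.take (ls.length - 1) = ls.dropLast := by
    rw [List.dropLast_eq_take]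
  have hg : ls.getD (ls.length - 1) [] = ls.getLast hne := by
    rw [List.getLast_eq_getElem, List.getD_eq_getElem?_getD,
      List.getElem?_eq_getElem (by omega)]
    simp
  rw [hd, hg]
  simp

lemma fA_newline : fA '\n' = '\n' := by decide

lemma joinLines_mySplit (s : List Char) : joinLines (mySplit s) = s.map fA := by
  induction s with
  | nil => simp [mySplit, joinLines]
  | cons x xs ih =>
    by_cases hx : x = '\n'
    · subst hx
      simp only [mySplit]
      cases hm : mySplit xs with
      | nil => exact absurd hm (mySplit_ne_nil xs)
      | cons h t =>
        rw [hm] at ih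
        simp [joinLines, ← ih, fA_newline]
    · simp only [mySplit, if_neg hx]
      cases hm : mySplit xs with
      | nil => exact absurd hm (mySplit_ne_nil xs)
      | cons h t =>
        rw [hm] at ih
        simp [List.modifyHead, joinLines_cons_head, ih]

-- the translation table maps exactly the codepoints 65..90
lemma table_get_aux (m : Nat) (h65 : 65 ≤ m) (h91 : m ≤ 91) (k : Int) :
    ((PySem.List.pyRange 65 (m : Int) 1).foldl
      (fun d i => d.insert i (i + 32)) PySem.Dict.empty).get? k =
      if 65 ≤ k ∧ k < (m : Int) then some (k + 32) else none := by
  induction m with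
  | zero => omega
  | succ n ih =>
    by_cases hn : 65 ≤ n
    · have hr : PySem.List.pyRange 65 ((n : Int) + 1) 1 =
          PySem.List.pyRange 65 (n : Int) 1 ++ PySem.List.pyRange (n : Int) ((n : Int) + 1) 1 :=
        PySem.List.pyRange_one_append 65 (n : Int) ((n : Int) + 1) (by exact_mod_cast hn) (by omega)
      have hr2 : PySem.List.pyRange (n : Int) ((n : Int) + 1) 1 = [(n : Int)] := by
        rw [PySem.List.pyRange_one_cons (by omega : (n : Int) < (n : Int) + 1)]
        have h0 : PySem.List.pyRange ((n : Int) + 1) ((n : Int) + 1) 1 = [] := by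
          simp [PySem.List.pyRange]
        rw [h0]
      have hcast : (((n + 1 : Nat)) : Int) = ((n : Int) + 1) := by push_cast; ring
      rw [hcast, hr, hr2, List.foldl_append]
      simp only [List.foldl_cons, List.foldl_nil]
      rw [PySem.Dict.get?_insert]
      by_cases hk : k = (n : Int)
      · subst hk
        have hc : 65 ≤ (n : Int) ∧ (n : Int) < (n : Int) + 1 := ⟨by exact_mod_cast hn, by omega⟩
        simp [hc]
      · rw [if_neg (by simpa using hk), ih hn (by omega)]
        split <;> split <;> first | rfl | omega
    · have hn65 : n + 1 = 65 := by omega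
      rw [hn65]
      have : PySem.List.pyRange 65 (65 : Int) 1 = [] := by decide
      rw [show ((65 : Nat) : Int) = (65 : Int) by norm_num, this]
      rw [if_neg (by omega)]
      simp [PySem.Dict.get?_empty]

lemma table_get (k : Int) :
    pvTable.get? k = if 65 ≤ k ∧ k < 91 then some (k + 32) else none := by
  have := table_get_aux 91 (by omega) (by omega) k
  simpa [pvTable] using this

lemma fB_eq_fA (c : Char) :
    (match pvTable.get? (c.toNat : Int) with
      | some v => Char.ofNat v.toNat
      | none => c) = fA c := by
  rw [table_get]
  by_cases h : 65 ≤ c.toNat ∧ c.toNat ≤ 90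
  · rw [if_pos (by constructor <;> [exact_mod_cast h.1; exact_mod_cast (by omega : (c.toNat : Int) < 91)])]
    have : ((c.toNat : Int) + 32).toNat = c.toNat + 32 := by omega
    simp [fA, if_pos h, this]
  · have hn : ¬((65 : Int) ≤ (c.toNat : Int) ∧ (c.toNat : Int) < 91) := by
      intro hc
      exact h ⟨by exact_mod_cast hc.1, by omega⟩
    rw [if_neg hn]
    simp [fA, if_neg h]

-- ===== VERDICT (by name: the statement is the Claim_ definition above) =====
theorem all_small_spec : Claim_equal_all_small := by
  intro para_ _
  unfold Spec_all_small all_small all_small_alt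
  simp only [splitOn_eq]
  rw [outer_fold _ (mySplit_ne_nil _), joinLines_mySplit]
  congr 1
  exact List.map_congr_left (fun c _ => (fB_eq_fA c).symm)
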